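-- pv_equiv track=rewrite | github.com/atsushi421/AlgorithmSimulator | input_tgff/python/task_allocation_old2.py | vacant_cluster
-- ===== SOURCE A (Python) =====
-- def vacant_cluster(num_of_core, target, result, cc_num):
--
--     earliest_time_idle = 999999999999
--     earliest_idle_core = -1  #最速でアイドル状態になるコア番号
--
--     for i in range(num_of_core):
--         if(target[cc_num][i][0] == -1):  #コアがアイドル状態なら
--             return 1, i
--
--         else:
--             if(earliest_time_idle >= result[target[cc_num][i][0]][3]):
--                 earliest_time_idle = result[target[cc_num][i][0]][3]
--                 earliest_idle_core = i
--
--     return -1, earliest_idle_core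
-- ===== SOURCE B (Python) =====
-- def vacant_cluster(num_of_core, target, result, cc_num):
--     # Pass 1: return the first idle core, if any.
--     for i in range(num_of_core):
--         if target[cc_num][i][0] == -1:
--             return 1, i
--     # Pass 2: argmin of finish time, last index wins ties via '>='.
--     best_time = 999999999999
--     best_core = -1
--     for i in range(num_of_core):
--         t = result[target[cc_num][i][0]][3]
--         if best_time >= t:
--             best_time = t
--             best_core = i
--     return -1, best_core
-- ===== Notes on version B (the rewrite author's own statement) =====
-- stated objective: simpler
-- what changed: A's single interleaved scan (early-return on idle while simultaneously tracking the earliest-finishing busy core) is split into two plain passes: find the first idle core, else a pure argmin scan with the >= last-tie-wins rule.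
import Mathlib
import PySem

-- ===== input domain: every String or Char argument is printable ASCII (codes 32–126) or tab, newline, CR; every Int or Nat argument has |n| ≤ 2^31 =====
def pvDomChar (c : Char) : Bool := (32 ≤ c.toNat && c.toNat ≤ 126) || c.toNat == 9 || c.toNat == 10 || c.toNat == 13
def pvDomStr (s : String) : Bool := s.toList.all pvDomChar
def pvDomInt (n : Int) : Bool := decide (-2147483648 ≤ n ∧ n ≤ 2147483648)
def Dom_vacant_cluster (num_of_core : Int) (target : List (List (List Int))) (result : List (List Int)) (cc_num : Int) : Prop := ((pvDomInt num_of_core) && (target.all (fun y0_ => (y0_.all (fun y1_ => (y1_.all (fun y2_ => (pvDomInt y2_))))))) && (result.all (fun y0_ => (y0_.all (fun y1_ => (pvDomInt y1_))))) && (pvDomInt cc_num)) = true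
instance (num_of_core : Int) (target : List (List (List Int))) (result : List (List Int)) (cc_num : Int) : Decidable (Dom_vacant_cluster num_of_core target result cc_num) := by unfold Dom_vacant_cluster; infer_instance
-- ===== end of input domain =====

-- B splits A's interleaved single scan into two passes (find first idle core; else a pure
-- argmin scan of finish times); objective: simpler decomposition, same cost.

-- ===== PORT A =====

-- target[cc_num][i][0]  (none = IndexError somewhere in the chain)
def vcHead (target : List (List (List Int))) (cc_num i : Int) : Option Int :=
  ((PySem.List.pyGet? target cc_num).bind (fun row => PySem.List.pyGet? row i)).bind
    (fun core => PySem.List.pyGet? core 0)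

-- result[v][3]  (none = IndexError)
def vcTime (result : List (List Int)) (v : Int) : Option Int :=
  (PySem.List.pyGet? result v).bind (fun r => PySem.List.pyGet? r 3)

-- A's 'for i in range(num_of_core)' body, step for step, as fuel/index recursion; the
-- 'none' branches are where Python raises IndexError (unreachable under Pre_vacant_cluster).
def vcA_loop (target : List (List (List Int))) (result : List (List Int)) (cc_num : Int) :
    ℕ → Int → Int → Int → Int × Int
  | 0, _, _, eic => (-1, eic)
  | fuel + 1, i, eti, eic =>
    match vcHead target cc_num i with
    | none => (0, 0)
    | some v =>
      if v = -1 then (1, i)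
      else
        match vcTime result v with
        | none => (0, 0)
        | some t =>
          if eti ≥ t then vcA_loop target result cc_num fuel (i + 1) t i
          else vcA_loop target result cc_num fuel (i + 1) eti eic

def vacant_cluster (num_of_core : Int) (target : List (List (List Int))) (result : List (List Int)) (cc_num : Int) : Int × Int :=
  vcA_loop target result cc_num num_of_core.toNat 0 999999999999 (-1)

-- ===== PORT B =====

-- pass 1: first idle core
def vcB_find (target : List (List (List Int))) (cc_num : Int) : ℕ → Int → Option Int
  | 0, _ => none
  | fuel + 1, i =>
    if vcHead target cc_num i = some (-1) then some i else vcB_find target cc_num fuel (i + 1)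

-- pass 2: argmin of finish time, '>=' so the last tied index wins; 'none' = Python raises
def vcB_best (target : List (List (List Int))) (result : List (List Int)) (cc_num : Int) :
    ℕ → Int → Int → Int → Int
  | 0, _, _, bc => bc
  | fuel + 1, i, bt, bc =>
    match (vcHead target cc_num i).bind (vcTime result) with
    | none => 0
    | some t =>
      if bt ≥ t then vcB_best target result cc_num fuel (i + 1) t i
      else vcB_best target result cc_num fuel (i + 1) bt bc

def vacant_cluster_alt (num_of_core : Int) (target : List (List (List Int))) (result : List (List Int)) (cc_num : Int) : Int × Int :=
  match vcB_find target cc_num num_of_core.toNat 0 with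
  | some i => (1, i)
  | none => (-1, vcB_best target result cc_num num_of_core.toNat 0 999999999999 (-1))

-- ===== PRECONDITION & SPEC =====

-- index i is safe for A's loop body: the chained lookup succeeds, and when the core is
-- busy the result-time lookup succeeds too
def vcOk (target : List (List (List Int))) (result : List (List Int)) (cc_num i : Int) : Bool :=
  match vcHead target cc_num i with
  | none => false
  | some v => v == -1 || (vcTime result v).isSome

-- length of target[cc_num] (0 when that lookup itself fails)
def vcRowLen (target : List (List (List Int))) (cc_num : Int) : Int :=
  match PySem.List.pyGet? target cc_num with
  | none => 0
  | some row => row.length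

-- Pre_ excludes exactly the inputs on which A raises IndexError: every index the loop
-- actually reaches (no earlier idle core) must be safe.  The scan can never get past
-- index rowlen (the lookup there already fails), so quantifying up to
-- min num_of_core (rowlen+1) is equivalent and keeps Pre_ checkable for huge counts.
def Pre_vacant_cluster (num_of_core : Int) (target : List (List (List Int))) (result : List (List Int)) (cc_num : Int) : Prop :=
  ∀ i ∈ PySem.List.pyRange 0 (min num_of_core (vcRowLen target cc_num + 1)) 1,
    (∀ j ∈ PySem.List.pyRange 0 i 1, vcHead target cc_num j ≠ some (-1)) →
    vcOk target result cc_num i = true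

instance (num_of_core : Int) (target : List (List (List Int))) (result : List (List Int)) (cc_num : Int) : Decidable (Pre_vacant_cluster num_of_core target result cc_num) := by unfold Pre_vacant_cluster; infer_instance

def pvWitness_vacant_cluster : Int × List (List (List Int)) × List (List Int) × Int :=
  (2, [[[0], [-1]]], [[9, 9, 9, 5]], 0)

def Spec_vacant_cluster (num_of_core : Int) (target : List (List (List Int))) (result : List (List Int)) (cc_num : Int) (out : Int × Int) : Prop := out = vacant_cluster_alt num_of_core target result cc_num
instance (num_of_core : Int) (target : List (List (List Int))) (result : List (List Int)) (cc_num : Int) (out : Int × Int) : Decidable (Spec_vacant_cluster num_of_core target result cc_num out) := by unfold Spec_vacant_cluster; infer_instance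

-- ===== CLAIM (what is proved, stated in full; the proofs are below) =====
def Claim_equal_vacant_cluster : Prop := ∀ (num_of_core : Int) (target : List (List (List Int))) (result : List (List Int)) (cc_num : Int), Dom_vacant_cluster num_of_core target result cc_num → Pre_vacant_cluster num_of_core target result cc_num → Spec_vacant_cluster num_of_core target result cc_num (vacant_cluster num_of_core target result cc_num)

-- ===== LEMMAS AND PROOFS =====

-- the loop is only reached along safe, non-idle prefixes
def okChain (target : List (List (List Int))) (result : List (List Int)) (cc_num : Int) :
    ℕ → Int → Prop
  | 0, _ => True
  | fuel + 1, i =>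
    vcOk target result cc_num i = true ∧
    (vcHead target cc_num i ≠ some (-1) → okChain target result cc_num fuel (i + 1))

lemma loop_eq (target : List (List (List Int))) (result : List (List Int)) (cc_num : Int) :
    ∀ (fuel : ℕ) (i bt bc : Int), okChain target result cc_num fuel i →
      vcA_loop target result cc_num fuel i bt bc =
        (match vcB_find target cc_num fuel i with
         | some k => (1, k)
         | none => (-1, vcB_best target result cc_num fuel i bt bc)) := by
  intro fuel
  induction fuel with
  | zero => intro i bt bc _; simp [vcA_loop, vcB_find, vcB_best]
  | succ fuel ih =>
    intro i bt bc h
    obtain ⟨hok, hrest⟩ := h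
    unfold vcOk at hok
    cases hv : vcHead target cc_num i with
    | none => rw [hv] at hok; simp at hok
    | some v =>
      rw [hv] at hok
      by_cases hidle : v = -1
      · subst hidle
        simp [vcA_loop, vcB_find, hv]
      · have hne : vcHead target cc_num i ≠ some (-1) := by
          rw [hv]; simp [hidle]
        have ht : (vcTime result v).isSome := by
          simpa [hidle] using hok
        cases htv : vcTime result v with
        | none => rw [htv] at ht; simp at ht
        | some t =>
          have hchain := hrest hne
          have hne' : ¬ (some v = some (-1 : Int)) := by simp [hidle]
          simp only [vcA_loop, vcB_find, vcB_best, hv, htv, if_neg hidle, if_neg hne',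
            Option.bind_some]
          by_cases hge : bt ≥ t
          · simp only [if_pos hge]; exact ih (i + 1) t i hchain
          · simp only [if_neg hge]; exact ih (i + 1) bt bc hchain

-- an index at/past the row's length fails its lookup
lemma vcOk_rowlen_false (target : List (List (List Int))) (result : List (List Int))
    (cc_num i : Int) (hi : vcRowLen target cc_num ≤ i) :
    vcOk target result cc_num i = false := by
  unfold vcOk vcHead
  cases hrow : PySem.List.pyGet? target cc_num with
  | none => rfl
  | some row =>
    have hnone : PySem.List.pyGet? row i = none := by
      rw [PySem.List.pyGet?_eq_none_iff]
      unfold vcRowLen at hi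
      rw [hrow] at hi
      simp only at hi
      unfold PySem.Raise.InRange
      omega
    simp [hnone]

lemma pre_chain (num_of_core : Int) (target : List (List (List Int))) (result : List (List Int)) (cc_num : Int)
    (hP : Pre_vacant_cluster num_of_core target result cc_num) :
    ∀ (fuel : ℕ) (a : Int), 0 ≤ a → a + fuel = num_of_core →
      (∀ j ∈ PySem.List.pyRange 0 a 1, vcHead target cc_num j ≠ some (-1)) →
      okChain target result cc_num fuel a := by
  intro fuel
  induction fuel with
  | zero => intro a _ _ _; trivial
  | succ fuel ih =>
    intro a ha hfa hpref
    have hlt : a < num_of_core := by omega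
    have hok : vcOk target result cc_num a = true := by
      by_cases hle : a ≤ vcRowLen target cc_num
      · exact hP a (by rw [PySem.List.mem_pyRange_one]; omega) hpref
      · -- a is beyond the row: already the instance at rowlen contradicts Pre_
        exfalso
        have hr0 : 0 ≤ vcRowLen target cc_num := by
          unfold vcRowLen; cases PySem.List.pyGet? target cc_num <;> simp
        have := hP (vcRowLen target cc_num)
          (by rw [PySem.List.mem_pyRange_one]; omega)
          (by
            intro j hj
            refine hpref j ?_
            rw [PySem.List.mem_pyRange_one] at hj ⊢
            omega)
        rw [vcOk_rowlen_false target result cc_num _ le_rfl] at this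
        exact Bool.false_ne_true this
    refine ⟨hok, ?_⟩
    intro hne
    refine ih (a + 1) (by omega) (by omega) ?_
    intro j hj
    rw [PySem.List.pyRange_one_succ_right ha] at hj
    rcases List.mem_append.mp hj with h | h
    · exact hpref j h
    · simp at h; subst h; exact hne

theorem vacant_cluster_spec : Claim_equal_vacant_cluster := by
  intro num_of_core target result cc_num _ hPre
  unfold Spec_vacant_cluster vacant_cluster vacant_cluster_alt
  refine loop_eq target result cc_num num_of_core.toNat 0 _ _ ?_
  by_cases hn : 0 ≤ num_of_core
  · exact pre_chain num_of_core target result cc_num hPre num_of_core.toNat 0 le_rfl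
      (by omega) (by simp)
  · have : num_of_core.toNat = 0 := by omega
    rw [this]; trivial
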